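-- pv_equiv track=rewrite | github.com/hbldh/AdventOfCode | AOC2017/day09.py | _remove_excl
-- ===== SOURCE A (Python) =====
-- def _remove_excl(data):
--     out = []
--     skip_one = False
--     for c in data:
--         if c == '!':
--             skip_one = True
--             continue
--         elif skip_one:
--             skip_one = False
--             continue
--         out.append(c)
--     return "".join(out)
-- ===== SOURCE B (Python) =====
-- def _remove_excl(data):
--     parts = []
--     i = 0
--     n = len(data)
--     while i < n:
--         if data[i] == '!':
--             while i < n and data[i] == '!':
--                 i += 1
--             i += 1  # skip the single character cancelled by the run of '!'
--         else:
--             parts.append(data[i])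
--             i += 1
--     return "".join(parts)
-- ===== Notes on version B (the rewrite author's own statement) =====
-- stated objective: alternative
-- what changed: Replaces the per-character boolean skip-flag fold with an index scan that swallows a whole run of exclamation marks at once and then drops the one cancelled character, keeping no flag state.
import Mathlib
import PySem

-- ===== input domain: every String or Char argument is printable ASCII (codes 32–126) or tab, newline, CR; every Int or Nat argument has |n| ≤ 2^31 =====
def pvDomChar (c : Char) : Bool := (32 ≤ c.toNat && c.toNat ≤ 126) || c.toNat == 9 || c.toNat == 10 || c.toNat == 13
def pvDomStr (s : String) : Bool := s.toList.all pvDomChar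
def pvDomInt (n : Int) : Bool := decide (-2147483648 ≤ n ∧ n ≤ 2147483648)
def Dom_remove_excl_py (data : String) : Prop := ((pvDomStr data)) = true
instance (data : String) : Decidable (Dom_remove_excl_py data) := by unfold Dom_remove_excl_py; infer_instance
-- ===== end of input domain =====

-- B replaces A's boolean skip-flag fold by a run-skipping scan (no flag state); same O(n) cost.

-- ===== PORT A =====
-- A: one pass with a skip_one flag; out accumulated by append, joined at the end.
def remove_excl_py (data : String) : String :=
  String.ofList
    (data.toList.foldl
      (fun (st : List Char × Bool) c =>
        if c = '!' then (st.1, true)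
        else if st.2 then (st.1, false)
        else (st.1 ++ [c], st.2))
      ([], false)).1

-- ===== PORT B =====
-- inner `while i < n and data[i] == '!'` of Source B: drop the leading run of '!'
def pvDropBangs : List Char → List Char
  | '!' :: rest => pvDropBangs rest
  | l => l

theorem pvDropBangs_length_le (l : List Char) : (pvDropBangs l).length ≤ l.length := by
  induction l with
  | nil => simp [pvDropBangs]
  | cons c rest ih =>
    by_cases h : c = '!'
    · subst h; simpa [pvDropBangs] using Nat.le_succ_of_le ih
    · simp [pvDropBangs, h]

-- outer while loop of Source B as structural recursion on the remaining characters
def pvAltGo : List Char → List Char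
  | [] => []
  | c :: rest =>
    if c = '!' then pvAltGo ((pvDropBangs rest).drop 1)
    else c :: pvAltGo rest
termination_by l => l.length
decreasing_by
  · have h := pvDropBangs_length_le rest
    simp only [List.length_drop, List.length_cons]
    omega
  · simp

def remove_excl_py_alt (data : String) : String := String.ofList (pvAltGo data.toList)

-- ===== PRECONDITION & SPEC =====
def Spec_remove_excl_py (data : String) (out : String) : Prop := out = remove_excl_py_alt data
instance (data : String) (out : String) : Decidable (Spec_remove_excl_py data out) := by unfold Spec_remove_excl_py; infer_instance

-- ===== CLAIM (what is proved, stated in full; the proofs are below) =====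
def Claim_equal_remove_excl_py : Prop := ∀ (data : String), Dom_remove_excl_py data → Spec_remove_excl_py data (remove_excl_py data)

-- ===== LEMMAS AND PROOFS =====

-- proof-side recursion equivalent to A's fold, with the flag as an argument
def pvG : Bool → List Char → List Char
  | _, [] => []
  | skip, c :: rest =>
    if c = '!' then pvG true rest
    else if skip then pvG false rest
    else c :: pvG false rest

theorem pvFoldl_eq_pvG (l : List Char) : ∀ (out : List Char) (skip : Bool),
    (l.foldl
      (fun (st : List Char × Bool) c =>
        if c = '!' then (st.1, true)
        else if st.2 then (st.1, false)
        else (st.1 ++ [c], st.2))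
      (out, skip)).1 = out ++ pvG skip l := by
  induction l with
  | nil => intro out skip; simp [pvG]
  | cons c rest ih =>
    intro out skip
    by_cases h : c = '!'
    · simp [h, List.foldl, ih, pvG]
    · by_cases hs : skip = true
      · simp [h, hs, List.foldl, ih, pvG]
      · simp at hs
        simp [h, hs, List.foldl, ih, pvG]

theorem pvG_eq_pvAltGo (l : List Char) :
    pvG false l = pvAltGo l ∧ pvG true l = pvAltGo ((pvDropBangs l).drop 1) := by
  induction l with
  | nil => simp [pvG, pvAltGo, pvDropBangs]
  | cons c rest ih =>
    by_cases h : c = '!'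
    · subst h
      constructor
      · rw [pvAltGo]; simp [pvG, ih.2]
      · simpa [pvG, pvDropBangs] using ih.2
    · constructor
      · rw [pvAltGo]; simp [pvG, h, ih.1]
      · have hd : pvDropBangs (c :: rest) = c :: rest := by
          cases hc : c; simp_all [pvDropBangs]
        simp [pvG, h, hd, ih.1]

-- ===== VERDICT (by name: the statement is the Claim_ definition above) =====
theorem remove_excl_py_spec : Claim_equal_remove_excl_py := by
  intro data _
  unfold Spec_remove_excl_py remove_excl_py remove_excl_py_alt
  rw [pvFoldl_eq_pvG, (pvG_eq_pvAltGo data.toList).1]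
  simp
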